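-- pv_equiv track=rewrite | github.com/hareshaprajapati/langgraph-agentic-ai | Single_V2_0/Siko_Wed_To_Sat.py | gap_pool
-- ===== SOURCE A (Python) =====
-- GAP_K = 2
--
-- MIN_GAP_SIZE = 2
--
-- class Gap:
--     def __init__(self, a, b):
--         self.a = a
--         self.b = b
--         self.inside = list(range(a + 1, b))
--         self.length = len(self.inside)
--
-- def gap_pool(wed):
--     xs = sorted(set(wed))
--     gaps = []
--     for a, b in zip(xs, xs[1:]):
--         if (b - a - 1) >= MIN_GAP_SIZE:
--             gaps.append(Gap(a, b))
--     gaps.sort(key=lambda g: (-g.length, g.a, g.b))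
--     out = []
--     for g in gaps[:GAP_K]:
--         for n in g.inside:
--             if n not in out:
--                 out.append(n)
--     return out
-- ===== SOURCE B (Python) =====
-- GAP_K = 2
--
-- MIN_GAP_SIZE = 2
--
-- def _better(g, h):
--     # gap g ranks before gap h: longer interior first, then smaller left endpoint
--     lg, lh = g[1] - g[0] - 1, h[1] - h[0] - 1
--     return lg > lh or (lg == lh and g[0] < h[0])
--
-- def gap_pool(wed):
--     xs = sorted(set(wed))
--     best = None
--     second = None
--     for a, b in zip(xs, xs[1:]):
--         if b - a - 1 >= MIN_GAP_SIZE: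
--             g = (a, b)
--             if best is None or _better(g, best):
--                 second = best
--                 best = g
--             elif second is None or _better(g, second):
--                 second = g
--     out = []
--     for g in (best, second):
--         if g is not None:
--             out.extend(range(g[0] + 1, g[1]))
--     return out
-- ===== Notes on version B (the rewrite author's own statement) =====
-- stated objective: faster
-- what changed: Instead of building the full gap list, sorting it by (-length, a, b) and slicing the top 2 with a membership-checked dedup append, B keeps only the best and second-best qualifying gap in a single pass over adjacent pairs of the sorted unique values and then emits their interiors directly (gaps are disjoint, so no dedup is needed).
import Mathlib
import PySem

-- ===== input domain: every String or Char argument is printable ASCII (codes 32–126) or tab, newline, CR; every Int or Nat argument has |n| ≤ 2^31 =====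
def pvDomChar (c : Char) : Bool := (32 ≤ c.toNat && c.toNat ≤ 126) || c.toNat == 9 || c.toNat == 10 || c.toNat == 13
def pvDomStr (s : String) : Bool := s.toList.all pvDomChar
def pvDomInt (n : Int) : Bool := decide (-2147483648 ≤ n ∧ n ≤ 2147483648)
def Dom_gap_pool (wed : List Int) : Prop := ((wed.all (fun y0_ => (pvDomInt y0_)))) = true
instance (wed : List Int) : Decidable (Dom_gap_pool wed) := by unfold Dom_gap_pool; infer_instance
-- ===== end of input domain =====

-- B replaces A's build-all-gaps / sort / slice-and-dedup pipeline by a single pass keeping only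
-- the two best gaps, then emits their interiors directly (measured faster in a timing run).

-- ===== PORT A =====
-- Python's sort key is the tuple (-g.length, g.a, g.b); the third component g.b can never be
-- compared (two gaps in the list always have distinct 'a'), so the key is ported as the
-- lexicographic pair (-(b-a-1), a) over Int ×ₗ Int (Python tuple '<' is lexicographic).
def gap_pool (wed : List Int) : List Int :=
  let xs := PySem.List.sorted (PySem.Set.ofList wed) (fun x => x)
  let gaps := (xs.zip xs.tail).foldl
      (fun acc p => if 2 ≤ p.2 - p.1 - 1 then acc ++ [p] else acc) []
  let sortedGaps := PySem.List.sorted gaps (fun g => (toLex (-(g.2 - g.1 - 1), g.1) : Int ×ₗ Int))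
  (sortedGaps.take 2).foldl
    (fun out g => (PySem.List.pyRange (g.1 + 1) g.2 1).foldl
        (fun out n => if n ∈ out then out else out ++ [n]) out) []

-- ===== PORT B =====
-- gap g ranks before gap h: longer interior first, then smaller left endpoint (Source B's _better)
def pvBetter (g h : Int × Int) : Bool :=
  (h.2 - h.1 - 1 < g.2 - g.1 - 1) || ((g.2 - g.1 - 1) == (h.2 - h.1 - 1) && g.1 < h.1)

-- one step of Source B's loop body: keep (best, second)
def pvUpd (st : Option (Int × Int) × Option (Int × Int)) (p : Int × Int) :
    Option (Int × Int) × Option (Int × Int) :=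
  if 2 ≤ p.2 - p.1 - 1 then
    match st with
    | (none, _) => (some p, none)          -- best is None (then second was None too)
    | (some b, s) =>
      if pvBetter p b then (some p, some b)
      else match s with
        | none => (some b, some p)
        | some sg => if pvBetter p sg then (some b, some p) else (some b, some sg)
  else st

def gap_pool_alt (wed : List Int) : List Int :=
  let xs := PySem.List.sorted (PySem.Set.ofList wed) (fun x => x)
  let st := (xs.zip xs.tail).foldl pvUpd (none, none)
  [st.1, st.2].foldl
    (fun out o => match o with
      | none => out
      | some g => out ++ PySem.List.pyRange (g.1 + 1) g.2 1) []

-- ===== PRECONDITION & SPEC =====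
def Spec_gap_pool (wed : List Int) (out : List Int) : Prop := out = gap_pool_alt wed
instance (wed : List Int) (out : List Int) : Decidable (Spec_gap_pool wed out) := by unfold Spec_gap_pool; infer_instance

-- ===== CLAIM (what is proved, stated in full; the proofs are below) =====
def Claim_equal_gap_pool : Prop := ∀ (wed : List Int), Dom_gap_pool wed → Spec_gap_pool wed (gap_pool wed)

-- ===== LEMMAS AND PROOFS =====

-- the sort key of A, as a function
def pvKey (g : Int × Int) : Int ×ₗ Int := toLex (-(g.2 - g.1 - 1), g.1)

-- (best, second) as a pair of options, read off the first two list elements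
def pvPairOf (s : List (Int × Int)) : Option (Int × Int) × Option (Int × Int) :=
  match s with
  | [] => (none, none)
  | [a] => (some a, none)
  | a :: b :: _ => (some a, some b)

-- the body of pvUpd once the gap qualifies
def pvCore (st : Option (Int × Int) × Option (Int × Int)) (p : Int × Int) :
    Option (Int × Int) × Option (Int × Int) :=
  match st with
  | (none, _) => (some p, none)
  | (some b, s) =>
    if pvBetter p b then (some p, some b)
    else match s with
      | none => (some b, some p)
      | some sg => if pvBetter p sg then (some b, some p) else (some b, some sg)

theorem pvBetter_iff (g h : Int × Int) : pvBetter g h = decide (pvKey g < pvKey h) := by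
  have h1 : (pvBetter g h = true) ↔ (pvKey g < pvKey h) := by
    simp only [pvBetter, pvKey, Prod.Lex.toLex_lt_toLex, Bool.or_eq_true, Bool.and_eq_true,
      decide_eq_true_eq, beq_iff_eq]
    omega
  rcases Bool.eq_false_or_eq_true (pvBetter g h) with hb | hb <;>
    simp [hb] at h1 ⊢ <;> simp [h1]

theorem pvBetter_fn : (fun a b => decide (pvKey a < pvKey b)) = pvBetter := by
  funext a b; rw [pvBetter_iff]

theorem pvUpd_eq (st : Option (Int × Int) × Option (Int × Int)) (p : Int × Int) :
    pvUpd st p = if 2 ≤ p.2 - p.1 - 1 then pvCore st p else st := by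
  obtain ⟨a, s⟩ := st
  cases a <;> cases s <;> simp [pvUpd, pvCore]

theorem pvPairOf_take2 (s : List (Int × Int)) : pvPairOf (s.take 2) = pvPairOf s := by
  match s with
  | [] => rfl
  | [a] => rfl
  | a :: b :: r => rfl

-- one insertion updates (best, second) exactly as Source B's branch does
theorem pvCore_pairOf (s : List (Int × Int)) (x : Int × Int) :
    pvCore (pvPairOf s) x = pvPairOf ((PySem.List.insertBy pvBetter x s).take 2) := by
  match s with
  | [] => rfl
  | [a] =>
    simp only [pvPairOf, pvCore, PySem.List.insertBy]
    split_ifs <;> rfl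
  | a :: b :: r =>
    simp only [pvPairOf, pvCore, PySem.List.insertBy]
    split_ifs <;> rfl

-- the one-pass best/second fold equals the first two elements of A's sorted gap list
theorem top2_eq (l : List (Int × Int)) :
    l.foldl pvCore (none, none) = pvPairOf ((PySem.List.sorted l pvKey).take 2) := by
  induction l using List.reverseRecOn with
  | nil => rfl
  | append_singleton l x ih =>
    have hs : PySem.List.sorted (l ++ [x]) pvKey
        = PySem.List.insertBy pvBetter x (PySem.List.sorted l pvKey) := by
      rw [PySem.List.sorted_eq_foldl_insertBy, PySem.List.sorted_eq_foldl_insertBy,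
        List.foldl_append, pvBetter_fn]
      rfl
    rw [List.foldl_append, List.foldl_cons, List.foldl_nil, ih, hs, pvPairOf_take2]
    exact pvCore_pairOf _ _

theorem pyRange_one_nodup (a b : Int) : (PySem.List.pyRange a b 1).Nodup := by
  rw [PySem.List.pyRange_of_pos a b (by norm_num)]
  refine (List.nodup_range).map ?_
  intro k1 k2 h
  simp only [] at h
  omega

-- appending with a membership check is a plain append when nothing is already present
theorem dedup_extend (ys : List Int) (out : List Int) (hn : ys.Nodup)
    (hd : ∀ n ∈ ys, n ∉ out) :
    ys.foldl (fun o n => if n ∈ o then o else o ++ [n]) out = out ++ ys := by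
  induction ys generalizing out with
  | nil => simp
  | cons y t ih =>
    have hy : y ∉ out := hd y (by simp)
    rw [List.foldl_cons, if_neg hy, ih (out ++ [y]) hn.of_cons]
    · simp
    · intro n hn'
      simp only [List.mem_append, List.mem_singleton]
      rintro (h | rfl)
      · exact hd n (by simp [hn']) h
      · exact (List.nodup_cons.mp hn).1 hn'

-- consecutive gaps of a strictly increasing list never overlap
theorem zip_tail_pairwise (xs : List Int) (h : xs.Pairwise (· < ·)) :
    (xs.zip xs.tail).Pairwise (fun p q => p.2 ≤ q.1) := by
  rw [List.pairwise_iff_getElem] at h ⊢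
  intro i j hi hj hij
  have hlen : (xs.zip xs.tail).length = min xs.length xs.tail.length := List.length_zip
  have hjx : j < xs.tail.length := by omega
  have hjx' : j < xs.length := by
    have := List.length_tail (l := xs); omega
  have hix : i + 1 < xs.length := by
    have := List.length_tail (l := xs); omega
  simp only [List.getElem_zip, List.getElem_tail]
  rcases Nat.lt_or_ge (i + 1) j with hlt | hge
  · exact le_of_lt (h (i + 1) j hix hjx' hlt)
  · have : i + 1 = j := by omega
    subst this
    exact le_rfl

-- emitting best then second equals the dedup-append loop over the first two sorted gaps
theorem out_eq (t : List (Int × Int)) (hlen : t.length ≤ 2)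
    (hdisj : t.Pairwise (fun p q => p.2 ≤ q.1 ∨ q.2 ≤ p.1)) :
    t.foldl
      (fun out g => (PySem.List.pyRange (g.1 + 1) g.2 1).foldl
        (fun out n => if n ∈ out then out else out ++ [n]) out) []
    = [(pvPairOf t).1, (pvPairOf t).2].foldl
        (fun out o => match o with
          | none => out
          | some g => out ++ PySem.List.pyRange (g.1 + 1) g.2 1) [] := by
  match t with
  | [] => rfl
  | [g] =>
    simp only [pvPairOf, List.foldl_cons, List.foldl_nil]
    rw [dedup_extend _ _ (pyRange_one_nodup _ _) (fun n _ hm => (List.not_mem_nil hm))]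
  | [g, h] =>
    have hgh : g.2 ≤ h.1 ∨ h.2 ≤ g.1 := (List.pairwise_cons.mp hdisj).1 h (by simp)
    have e2 : ∀ n ∈ PySem.List.pyRange (h.1 + 1) h.2 1, n ∉ PySem.List.pyRange (g.1 + 1) g.2 1 := by
      intro n hn hmem
      rw [PySem.List.mem_pyRange_one] at hn hmem
      omega
    simp only [pvPairOf, List.foldl_cons, List.foldl_nil]
    rw [dedup_extend _ _ (pyRange_one_nodup _ _) (fun n _ hm => (List.not_mem_nil hm)),
      List.nil_append, dedup_extend _ _ (pyRange_one_nodup _ _) e2]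
  | a :: b :: c :: r => simp at hlen

-- the two ports, with their local bindings expanded (definitional)
theorem gap_pool_def (wed : List Int) :
    gap_pool wed =
      (((PySem.List.sorted
          (((PySem.List.sorted (PySem.Set.ofList wed) (fun x => x)).zip
              (PySem.List.sorted (PySem.Set.ofList wed) (fun x => x)).tail).foldl
            (fun acc p => if 2 ≤ p.2 - p.1 - 1 then acc ++ [p] else acc) [])
          pvKey).take 2).foldl
        (fun out g => (PySem.List.pyRange (g.1 + 1) g.2 1).foldl
          (fun out n => if n ∈ out then out else out ++ [n]) out) []) := rfl

theorem gap_pool_alt_def (wed : List Int) :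
    gap_pool_alt wed =
      (let st := (((PySem.List.sorted (PySem.Set.ofList wed) (fun x => x)).zip
              (PySem.List.sorted (PySem.Set.ofList wed) (fun x => x)).tail).foldl pvUpd (none, none));
        [st.1, st.2].foldl
          (fun out o => match o with
            | none => out
            | some g => out ++ PySem.List.pyRange (g.1 + 1) g.2 1) []) := rfl

theorem gap_pool_spec' (wed : List Int) : gap_pool wed = gap_pool_alt wed := by
  rw [gap_pool_def, gap_pool_alt_def]
  have hxp : (PySem.List.sorted (PySem.Set.ofList wed) (fun x => x)).Pairwise (· < ·) :=
    PySem.List.sorted_ofList_pairwise_lt wed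
  set xs := PySem.List.sorted (PySem.Set.ofList wed) (fun x => x) with hxs
  -- both loops over the adjacent pairs reduce to the same filtered gap list
  have hA : (xs.zip xs.tail).foldl (fun acc p => if 2 ≤ p.2 - p.1 - 1 then acc ++ [p] else acc) []
      = (xs.zip xs.tail).filter (fun p => decide (2 ≤ p.2 - p.1 - 1)) := by
    simpa using PySem.List.foldl_append_ite_eq_filter
      (fun p : Int × Int => 2 ≤ p.2 - p.1 - 1) (xs.zip xs.tail) []
  rw [hA]
  have hupd : (xs.zip xs.tail).foldl pvUpd (none, none)
      = ((xs.zip xs.tail).filter (fun p => decide (2 ≤ p.2 - p.1 - 1))).foldl pvCore (none, none) := by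
    rw [show pvUpd = (fun st p => if 2 ≤ p.2 - p.1 - 1 then pvCore st p else st) from
        funext fun st => funext fun p => pvUpd_eq st p]
    exact PySem.List.foldl_ite_eq_foldl_filter
      (fun p : Int × Int => 2 ≤ p.2 - p.1 - 1) pvCore (xs.zip xs.tail) (none, none)
  rw [hupd]
  set gaps := (xs.zip xs.tail).filter (fun p => decide (2 ≤ p.2 - p.1 - 1)) with hgaps
  rw [top2_eq]
  -- disjointness of the two selected gaps
  have hpair : gaps.Pairwise (fun p q => p.2 ≤ q.1 ∨ q.2 ≤ p.1) := by
    refine List.Pairwise.filter _ ?_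
    exact (zip_tail_pairwise xs hxp).imp (fun h => Or.inl h)
  have hsp : (PySem.List.sorted gaps pvKey).Pairwise (fun p q => p.2 ≤ q.1 ∨ q.2 ≤ p.1) := by
    refine ((PySem.List.sorted_perm gaps pvKey false).pairwise_iff ?_).mpr hpair
    intro a b h
    exact h.symm.imp (fun x => x) (fun x => x)
  have htd : ((PySem.List.sorted gaps pvKey).take 2).Pairwise (fun p q => p.2 ≤ q.1 ∨ q.2 ≤ p.1) :=
    hsp.sublist (List.take_sublist 2 _)
  rw [out_eq _ (by simp) htd,
    pvPairOf_take2]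

-- ===== VERDICT (by name: the statement is the Claim_ definition above) =====
theorem gap_pool_spec : Claim_equal_gap_pool := by
  intro wed _
  unfold Spec_gap_pool
  exact gap_pool_spec' wed
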